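-- pv_equiv track=rewrite | github.com/hemusuku86/Prosopo-Procaptcha | prosopo.py | tt
-- ===== SOURCE A (Python) =====
-- def tt(n):
--     e = len(n)
--     t = 0
--     for i in range(e):
--         t += len(n[i])
--     r = [0]*t
--     s = 0
--     for i in range(e):
--         o = n[i]
--         for ii in range(len(o)):
--             r[s+ii] = o[ii]
--         s += len(o)
--     return r
-- ===== SOURCE B (Python) =====
-- def tt(n):
--     r = []
--     for o in n:
--         r.extend(o)
--     return r
-- ===== Notes on version B (the rewrite author's own statement) =====
-- stated objective: simpler
-- what changed: Replaces A's count-then-fill scheme (length-summing pass, preallocated [0]*t buffer, running-offset index writes) with a single appending pass that extends an accumulator list.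
import Mathlib
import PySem

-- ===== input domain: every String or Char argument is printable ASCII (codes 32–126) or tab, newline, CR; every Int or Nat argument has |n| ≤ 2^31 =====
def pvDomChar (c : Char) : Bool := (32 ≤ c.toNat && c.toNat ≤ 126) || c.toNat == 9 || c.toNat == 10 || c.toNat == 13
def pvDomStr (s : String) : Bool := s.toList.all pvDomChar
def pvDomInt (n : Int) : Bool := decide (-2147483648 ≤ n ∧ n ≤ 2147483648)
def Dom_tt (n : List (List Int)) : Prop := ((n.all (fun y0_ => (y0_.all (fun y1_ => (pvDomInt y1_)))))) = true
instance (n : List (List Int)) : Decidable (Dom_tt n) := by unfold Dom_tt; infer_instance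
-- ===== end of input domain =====

-- B flattens with a single appending pass (accumulator + extend), replacing A's
-- count-then-fill scheme (length-summing pass, preallocated buffer, offset-indexed writes).


-- ===== PORT A =====
-- t = sum of the sublist lengths; r = [0]*t; then fill r by running offset s,
-- writing r[s+ii] = o[ii] for each sublist o (inner loop as enumerate of o).
def tt (n : List (List Int)) : List Int :=
  let t : Int := n.foldl (fun t o => t + (o.length : Int)) 0
  let r : List Int := PySem.List.pyRepeat [(0 : Int)] t
  let fin := n.foldl
    (fun (rs : List Int × Int) o =>
      ((PySem.List.enumerate o 0).foldl
         (fun r p => PySem.List.pySetD r (rs.2 + p.1) p.2) rs.1,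
       rs.2 + (o.length : Int)))
    (r, 0)
  fin.1

-- ===== PORT B =====
-- r = []; for o in n: r.extend(o); return r
def tt_alt (n : List (List Int)) : List Int :=
  n.foldl (fun r o => r ++ o) []

-- ===== PRECONDITION & SPEC =====
def Spec_tt (n : List (List Int)) (out : List Int) : Prop := out = tt_alt n
instance (n : List (List Int)) (out : List Int) : Decidable (Spec_tt n out) := by unfold Spec_tt; infer_instance

-- ===== CLAIM (what is proved, stated in full; the proofs are below) =====
def Claim_equal_tt : Prop := ∀ (n : List (List Int)), Dom_tt n → Spec_tt n (tt n)

-- ===== LEMMAS AND PROOFS =====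

lemma foldl_append_acc (n : List (List Int)) : ∀ acc : List Int,
    n.foldl (fun r o => r ++ o) acc = acc ++ n.flatten := by
  induction n with
  | nil => simp
  | cons o n ih => intro acc; simp [ih]

lemma tt_alt_eq_flatten (n : List (List Int)) : tt_alt n = n.flatten := by
  simpa using foldl_append_acc n []

lemma sum_lens (n : List (List Int)) : ∀ t : Int,
    n.foldl (fun t o => t + (o.length : Int)) t = t + (n.flatten.length : Int) := by
  induction n with
  | nil => simp
  | cons o n ih => intro t; simp [ih]; ring_nf

-- the inner fill loop writes o into the slot of length ≥ len o starting at position j + c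
lemma inner_fill (o : List Int) : ∀ (c j : Int) (a b : List Int),
    j + c = (a.length : Int) → o.length ≤ b.length →
    (PySem.List.enumerate o c).foldl
      (fun r p => PySem.List.pySetD r (j + p.1) p.2) (a ++ b)
      = a ++ o ++ b.drop o.length := by
  induction o with
  | nil => intro c j a b _ _; simp
  | cons x o ih =>
      intro c j a b hjc hlen
      cases b with
      | nil => simp at hlen
      | cons y b =>
        rw [PySem.List.enumerate_cons, List.foldl_cons]
        have hset : PySem.List.pySetD (a ++ y :: b) (j + c) x = (a ++ [x]) ++ b := by
          rw [hjc, PySem.List.pySetD_natCast]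
          simp
        rw [hset]
        have := ih (c + 1) j (a ++ [x]) b (by simp [← hjc]; ring) (by simpa using hlen)
        rw [this]
        simp

-- the outer loop, started at offset a.length with buffer a ++ rest, produces a ++ flatten n ++ leftover
lemma outer_fill (n : List (List Int)) : ∀ (a rest : List Int),
    n.flatten.length ≤ rest.length →
    (n.foldl
      (fun (rs : List Int × Int) o =>
        ((PySem.List.enumerate o 0).foldl
           (fun r p => PySem.List.pySetD r (rs.2 + p.1) p.2) rs.1,
         rs.2 + (o.length : Int)))
      (a ++ rest, (a.length : Int))).1
      = a ++ n.flatten ++ rest.drop n.flatten.length := by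
  induction n with
  | nil => intro a rest _; simp
  | cons o n ih =>
      intro a rest hlen
      have hlen' : o.length + n.flatten.length ≤ rest.length := by simpa using hlen
      rw [List.foldl_cons]
      have h1 := inner_fill o 0 (a.length : Int) a rest (by simp) (by omega)
      have hstep :
          ((PySem.List.enumerate o 0).foldl
             (fun r p => PySem.List.pySetD r (((a ++ rest, (a.length : Int)) : List Int × Int).2 + p.1) p.2)
             ((a ++ rest, (a.length : Int)) : List Int × Int).1,
           ((a ++ rest, (a.length : Int)) : List Int × Int).2 + (o.length : Int))
          = ((a ++ o) ++ rest.drop o.length, ((a ++ o).length : Int)) := by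
        simp [h1, List.append_assoc]
      rw [hstep]
      rw [ih (a ++ o) (rest.drop o.length) (by simp only [List.length_drop]; omega)]
      simp [List.drop_drop, List.append_assoc]

lemma tt_eq_flatten (n : List (List Int)) : tt n = n.flatten := by
  have ht : n.foldl (fun t o => t + (o.length : Int)) 0 = (n.flatten.length : Int) := by
    simpa using sum_lens n 0
  show (n.foldl
    (fun (rs : List Int × Int) o =>
      ((PySem.List.enumerate o 0).foldl
         (fun r p => PySem.List.pySetD r (rs.2 + p.1) p.2) rs.1,
       rs.2 + (o.length : Int)))
    (PySem.List.pyRepeat [(0 : Int)] (n.foldl (fun t o => t + (o.length : Int)) 0), 0)).1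
    = n.flatten
  rw [ht, PySem.List.pyRepeat_singleton]
  have := outer_fill n [] (List.replicate (n.flatten.length : Int).toNat 0) (by rw [List.length_replicate, Int.toNat_natCast])
  simpa using this

-- ===== VERDICT (by name: the statement is the Claim_ definition above) =====
theorem tt_spec : Claim_equal_tt := by
  intro n _
  unfold Spec_tt
  rw [tt_eq_flatten, tt_alt_eq_flatten]
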